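-- pv_equiv track=rewrite | github.com/eapolinario/advent-of-code | 2020/day-17/part-2.py | generate_neighbor_positions
-- ===== SOURCE A (Python) =====
-- import itertools
--
-- def generate_neighbor_positions(cubes, cube):
--     neighbors = []
--     dim = len(cube)
--     for coords in itertools.product([-1, 0, 1], repeat=dim):
--         if coords == (0,) * dim:
--             continue
--         pos = tuple(a + b for a, b in zip(cube, coords))
--         neighbors.append(pos)
--     return neighbors
-- ===== SOURCE B (Python) =====
-- def generate_neighbor_positions(cubes, cube):
--     # Build the whole 3^d block of shifted points by recursion on the coordinates,
--     # then delete the single occurrence of the center point itself.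
--     def block(i):
--         if i == len(cube):
--             return [()]
--         c = cube[i]
--         return [(v,) + tail for v in (c - 1, c, c + 1) for tail in block(i + 1)]
--     points = block(0)
--     points.remove(tuple(cube))
--     return points
-- ===== Notes on version B (the rewrite author's own statement) =====
-- stated objective: alternative
-- what changed: Instead of enumerating offset tuples from itertools.product and skipping the all-zero offset with a per-element comparison, B recursively builds the full 3^d block of already-shifted points (coordinate by coordinate) and then deletes the single occurrence of the center point with one list.remove.
import Mathlib
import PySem

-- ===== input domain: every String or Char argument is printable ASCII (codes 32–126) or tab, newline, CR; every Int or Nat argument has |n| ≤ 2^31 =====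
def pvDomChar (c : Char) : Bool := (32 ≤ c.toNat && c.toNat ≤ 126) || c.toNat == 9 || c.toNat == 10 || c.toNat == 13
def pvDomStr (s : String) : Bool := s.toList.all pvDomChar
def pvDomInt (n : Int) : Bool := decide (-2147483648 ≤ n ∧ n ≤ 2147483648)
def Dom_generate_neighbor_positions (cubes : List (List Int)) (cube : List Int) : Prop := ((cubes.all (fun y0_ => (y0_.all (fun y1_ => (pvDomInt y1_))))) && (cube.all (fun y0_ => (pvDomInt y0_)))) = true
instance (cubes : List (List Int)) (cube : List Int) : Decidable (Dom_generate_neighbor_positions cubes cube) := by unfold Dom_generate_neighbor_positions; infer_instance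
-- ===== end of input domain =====

-- B builds the whole 3^d block of already-shifted points by recursion on the coordinates and
-- deletes the single occurrence of the center point, instead of enumerating offset tuples and
-- skipping the all-zero one per element; same cost, different decomposition (objective: alternative).

-- ===== PORT A =====
-- itertools.product([-1,0,1], repeat=dim) in lexicographic order (first coordinate varies slowest)
def pvProd3 : Nat → List (List Int)
  | 0 => [[]]
  | d+1 => [(-1 : Int), 0, 1].flatMap (fun a => (pvProd3 d).map (a :: ·))

def generate_neighbor_positions (cubes : List (List Int)) (cube : List Int) : List (List Int) :=
  let dim := cube.length
  (pvProd3 dim).foldl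
    (fun neighbors coords =>
      if coords = List.replicate dim (0 : Int) then neighbors
      else neighbors ++ [List.zipWith (· + ·) cube coords]) []

-- ===== PORT B =====
-- Source B's block(i): recursion on the remaining coordinates, shifted values c-1, c, c+1 per level
def pvBlock : List Int → List (List Int)
  | [] => [[]]
  | c :: rest => [c - 1, c, c + 1].flatMap (fun v => (pvBlock rest).map (v :: ·))

-- Python's points.remove(tuple(cube)) deletes the first occurrence of the center; the center
-- always occurs in the block (it is the image of the all-zero offset), so List.erase (first-
-- occurrence removal, identity when absent) is exact: Python's ValueError branch is unreachable.
def generate_neighbor_positions_alt (cubes : List (List Int)) (cube : List Int) : List (List Int) :=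
  (pvBlock cube).erase cube

-- ===== PRECONDITION & SPEC =====
def Spec_generate_neighbor_positions (cubes : List (List Int)) (cube : List Int) (out : List (List Int)) : Prop := out = generate_neighbor_positions_alt cubes cube
instance (cubes : List (List Int)) (cube : List Int) (out : List (List Int)) : Decidable (Spec_generate_neighbor_positions cubes cube out) := by unfold Spec_generate_neighbor_positions; infer_instance

-- ===== CLAIM (what is proved, stated in full; the proofs are below) =====
def Claim_equal_generate_neighbor_positions : Prop := ∀ (cubes : List (List Int)) (cube : List Int), Dom_generate_neighbor_positions cubes cube → Spec_generate_neighbor_positions cubes cube (generate_neighbor_positions cubes cube)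

-- ===== LEMMAS AND PROOFS =====

-- an 'if skip: continue else append' loop is a filter + map
theorem pv_foldl_skip {α β : Type} (p : α → Prop) [DecidablePred p] (f : α → β) :
    ∀ (l : List α) (acc : List β),
      l.foldl (fun acc x => if p x then acc else acc ++ [f x]) acc
        = acc ++ (l.filter (fun x => decide ¬ p x)).map f := by
  intro l
  induction l with
  | nil => intro acc; simp
  | cons x xs ih =>
      intro acc
      by_cases h : p x <;> simp [List.foldl_cons, h, ih]

theorem pv_len_mem : ∀ (d : Nat) (x : List Int), x ∈ pvProd3 d → x.length = d := by
  intro d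
  induction d with
  | zero => intro x hx; simp [pvProd3] at hx; simp [hx]
  | succ d ih =>
      intro x hx
      simp only [pvProd3, List.mem_flatMap, List.mem_map] at hx
      obtain ⟨a, _, y, hy, rfl⟩ := hx
      simp [ih y hy]

theorem pv_nodup : ∀ d : Nat, (pvProd3 d).Nodup := by
  intro d
  induction d with
  | zero => decide
  | succ d ih =>
      simp only [pvProd3, List.flatMap_cons, List.flatMap_nil, List.append_nil]
      have hm : ∀ a : Int, ((pvProd3 d).map (a :: ·)).Nodup :=
        fun a => ih.map (fun x y h => by injection h)
      have hdis : ∀ a b : Int, a ≠ b →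
          List.Disjoint ((pvProd3 d).map (a :: ·)) ((pvProd3 d).map (b :: ·)) := by
        intro a b hab x hxa hxb
        simp only [List.mem_map] at hxa hxb
        obtain ⟨y, _, rfl⟩ := hxa
        obtain ⟨z, _, hz⟩ := hxb
        exact hab (by injection hz.symm)
      have hne : ∀ (a b : Int), a ≠ b → ∀ x ∈ (pvProd3 d).map (a :: ·),
          ∀ y ∈ (pvProd3 d).map (b :: ·), x ≠ y :=
        fun a b hab x hx y hy hxy => hdis a b hab hx (hxy ▸ hy)
      rw [List.nodup_append, List.nodup_append]
      refine ⟨hm _, ⟨hm _, hm _, hne 0 1 (by decide)⟩, ?_⟩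
      intro x hx y hy
      rcases List.mem_append.mp hy with h | h
      · exact hne (-1) 0 (by decide) x hx y h
      · exact hne (-1) 1 (by decide) x hx y h

theorem pv_zip_inj : ∀ (cube x y : List Int), x.length = cube.length → y.length = cube.length →
    List.zipWith (· + ·) cube x = List.zipWith (· + ·) cube y → x = y := by
  intro cube
  induction cube with
  | nil =>
      intro x y hx hy _
      rw [List.length_eq_zero_iff.mp hx, List.length_eq_zero_iff.mp hy]
  | cons c cs ih =>
      intro x y hx hy h
      cases x with
      | nil => simp at hx
      | cons a xs =>
          cases y with
          | nil => simp at hy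
          | cons b ys =>
              simp only [List.zipWith_cons_cons, List.cons.injEq] at h
              have : a = b := by omega
              simp only [List.length_cons, Nat.succ.injEq] at hx hy
              exact this ▸ (ih xs ys hx hy h.2) ▸ rfl

theorem pv_zip_replicate : ∀ cube : List Int,
    List.zipWith (· + ·) cube (List.replicate cube.length 0) = cube := by
  intro cube
  induction cube with
  | nil => rfl
  | cons c cs ih => simp [List.replicate_succ, ih]

theorem pv_block_eq : ∀ cube : List Int,
    pvBlock cube = (pvProd3 cube.length).map (List.zipWith (· + ·) cube) := by
  intro cube
  induction cube with
  | nil => rfl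
  | cons c cs ih =>
      simp only [pvBlock, List.length_cons, pvProd3, ih, List.flatMap_cons, List.flatMap_nil,
        List.append_nil, List.map_append, List.map_map]
      have h : ∀ a : Int, (pvProd3 cs.length).map (List.zipWith (· + ·) (c :: cs) ∘ (a :: ·))
          = (pvProd3 cs.length).map (((c + a) :: ·) ∘ List.zipWith (· + ·) cs) := by
        intro a
        apply List.map_congr_left
        intro x _
        simp
      rw [h (-1), h 0, h 1]
      norm_num [Function.comp_def]
      intro a _
      ring

-- ===== VERDICT (by name: the statement is the Claim_ definition above) =====
theorem generate_neighbor_positions_spec : Claim_equal_generate_neighbor_positions := by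
  intro cubes cube _
  show generate_neighbor_positions cubes cube = generate_neighbor_positions_alt cubes cube
  unfold generate_neighbor_positions generate_neighbor_positions_alt
  set d := cube.length with hd
  set f := List.zipWith (· + ·) cube with hf
  set z := List.replicate d (0 : Int) with hz
  have hcz : f z = cube := pv_zip_replicate cube
  have hnd : ((pvProd3 d).map f).Nodup :=
    (pv_nodup d).map_on (fun x hx y hy h =>
      pv_zip_inj cube x y (pv_len_mem d x hx) (pv_len_mem d y hy) h)
  rw [pv_foldl_skip (fun coords => coords = z) f, pv_block_eq, ← hd, ← hf, ← hcz,
    List.Nodup.erase_eq_filter hnd, List.filter_map]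
  simp only [Function.comp_def]
  have hfil : List.filter (fun x => f x != f z) (pvProd3 d)
      = List.filter (fun x => decide ¬ x = z) (pvProd3 d) := by
    apply List.filter_congr
    intro x hx
    have hiff : f x = f z ↔ x = z :=
      ⟨fun h => pv_zip_inj cube x z (pv_len_mem d x hx) (by simp [hz, hd]) h,
       fun h => by rw [h]⟩
    apply Bool.eq_iff_iff.mpr
    simp [hiff]
  rw [hfil]
  simp
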